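-- pv_equiv track=rewrite | github.com/AmiyaBot/Amiya-Bot | core/resource/arknightsGameData/operatorBuilder.py | build_range
-- ===== SOURCE A (Python) =====
-- def build_range(grids):
--     _max = [0, 0, 0, 0]
--     for item in [{'row': 0, 'col': 0}] + grids:
--         row = item['row']
--         col = item['col']
--         if row <= _max[0]:
--             _max[0] = row
--         if row >= _max[1]:
--             _max[1] = row
--         if col <= _max[2]:
--             _max[2] = col
--         if col >= _max[3]:
--             _max[3] = col
--
--     width = abs(_max[2]) + _max[3] + 1
--     height = abs(_max[0]) + _max[1] + 1
--
--     empty = '　'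
--     block = '□'
--     origin = '■'
--
--     range_map = []
--     for h in range(height):
--         range_map.append([empty for _ in range(width)])
--
--     for item in grids:
--         x = abs(_max[0]) + item['row']
--         y = abs(_max[2]) + item['col']
--         range_map[x][y] = block
--     range_map[abs(_max[0])][abs(_max[2])] = origin
--
--     return ''.join([''.join(item) + '\n' for item in range_map])
-- ===== SOURCE B (Python) =====
-- def build_range(grids):
--     pts = [(g['row'], g['col']) for g in grids]
--     rows = [0] + [p[0] for p in pts]
--     cols = [0] + [p[1] for p in pts]
--     min_r, max_r = min(rows), max(rows)
--     min_c, max_c = min(cols), max(cols)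
--     cells = {(r - min_r, c - min_c) for r, c in pts}
--     o = (-min_r, -min_c)
--     out = []
--     for h in range(max_r - min_r + 1):
--         line = ''.join(
--             '■' if (h, w) == o else ('□' if (h, w) in cells else '　')
--             for w in range(max_c - min_c + 1))
--         out.append(line + '\n')
--     return ''.join(out)
-- ===== Notes on version B (the rewrite author's own statement) =====
-- stated objective: simpler
-- what changed: A scatter-writes blocks into a pre-built mutable grid and then overwrites the origin cell; B computes the min/max bounds, collects the shifted coordinates into a set, and generates every cell directly with an origin-first lookup, joining rows on the fly with no mutable grid.
-- outside the precondition, e.g. on build_range([{'col': 0}]): A raises KeyError, B raises KeyError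
import Mathlib
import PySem

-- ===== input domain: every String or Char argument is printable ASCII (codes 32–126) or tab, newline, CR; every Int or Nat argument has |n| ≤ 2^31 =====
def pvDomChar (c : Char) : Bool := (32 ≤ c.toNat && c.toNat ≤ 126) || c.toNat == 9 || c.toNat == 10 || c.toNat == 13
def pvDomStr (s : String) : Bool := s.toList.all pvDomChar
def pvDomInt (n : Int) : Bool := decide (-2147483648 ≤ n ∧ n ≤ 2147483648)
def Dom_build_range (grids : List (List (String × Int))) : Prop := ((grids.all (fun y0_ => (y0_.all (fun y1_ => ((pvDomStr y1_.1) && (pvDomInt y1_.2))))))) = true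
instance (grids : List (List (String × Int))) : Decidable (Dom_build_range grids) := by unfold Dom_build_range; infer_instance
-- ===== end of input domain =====

-- B replaces A's scatter-write into a mutable grid by a per-cell gather: compute the
-- bounds once, collect the shifted coordinates in a set, and emit every cell with a
-- lookup (objective: simpler decomposition, same asymptotic cost).
-- ===== PORT A =====
def build_range (grids : List (List (String × Int))) : String :=
  let items := [("row", (0:Int)), ("col", 0)] :: grids
  let m := items.foldl (fun (m : Int × Int × Int × Int) item =>
      let row := (List.lookup "row" item).getD 0   -- KeyError when absent: excluded by Pre_
      let col := (List.lookup "col" item).getD 0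
      let m0 := if row ≤ m.1 then row else m.1
      let m1 := if row ≥ m.2.1 then row else m.2.1
      let m2 := if col ≤ m.2.2.1 then col else m.2.2.1
      let m3 := if col ≥ m.2.2.2 then col else m.2.2.2
      (m0, m1, m2, m3)) (0, 0, 0, 0)
  let width : Int := |m.2.2.1| + m.2.2.2 + 1
  let height : Int := |m.1| + m.2.1 + 1
  let empty := "　"
  let block := "□"
  let range_map := (PySem.List.pyRange 0 height 1).map
      (fun _ => (PySem.List.pyRange 0 width 1).map (fun _ => empty))
  -- range_map[x][y] = block: the indices are always in range here, so the total
  -- pyGetD/pySetD forms are exact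
  let range_map := grids.foldl (fun M item =>
      let x := |m.1| + (List.lookup "row" item).getD 0
      let y := |m.2.2.1| + (List.lookup "col" item).getD 0
      PySem.List.pySetD M x (PySem.List.pySetD (PySem.List.pyGetD M x []) y block)) range_map
  let range_map := PySem.List.pySetD range_map |m.1|
      (PySem.List.pySetD (PySem.List.pyGetD range_map |m.1| []) |m.2.2.1| "■")
  PySem.Str.join "" (range_map.map (fun item => PySem.Str.join "" item ++ "\n"))

-- ===== PORT B =====
-- item['row'] / item['col'] on the association-list dict (first match)
def pvRC (g : List (String × Int)) : Int × Int :=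
  ((List.lookup "row" g).getD 0, (List.lookup "col" g).getD 0)

def build_range_alt (grids : List (List (String × Int))) : String :=
  let pts := grids.map pvRC
  let rows := 0 :: pts.map (·.1)
  let cols := 0 :: pts.map (·.2)
  let minr := (PySem.List.min? rows (fun x => x)).getD 0
  let maxr := (PySem.List.max? rows (fun x => x)).getD 0
  let minc := (PySem.List.min? cols (fun x => x)).getD 0
  let maxc := (PySem.List.max? cols (fun x => x)).getD 0
  let cells : PySem.Set (Int × Int) :=
    PySem.Set.ofList (pts.map (fun p => (p.1 - minr, p.2 - minc)))
  let o : Int × Int := (-minr, -minc)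
  PySem.Str.join "" ((PySem.List.pyRange 0 (maxr - minr + 1) 1).map (fun h =>
    PySem.Str.join "" ((PySem.List.pyRange 0 (maxc - minc + 1) 1).map (fun w =>
      if (h, w) = o then "■" else if PySem.Set.contains cells (h, w) then "□" else "　")) ++ "\n"))

-- ===== PRECONDITION & SPEC =====
-- Pre_ excludes exactly the dicts missing a 'row' or 'col' key, on which Python A raises KeyError.
def Pre_build_range (grids : List (List (String × Int))) : Prop :=
  (grids.all (fun g => (List.lookup "row" g).isSome && (List.lookup "col" g).isSome)) = true
instance (grids : List (List (String × Int))) : Decidable (Pre_build_range grids) := by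
  unfold Pre_build_range; infer_instance

def pvWitness_build_range : (List (List (String × Int))) :=
  [[("row", 1), ("col", -2)], [("row", -1), ("col", 0)]]

def Spec_build_range (grids : List (List (String × Int))) (out : String) : Prop := out = build_range_alt grids
instance (grids : List (List (String × Int))) (out : String) : Decidable (Spec_build_range grids out) := by unfold Spec_build_range; infer_instance

-- ===== CLAIM (what is proved, stated in full; the proofs are below) =====
def Claim_equal_build_range : Prop := ∀ (grids : List (List (String × Int))), Dom_build_range grids → Pre_build_range grids → Spec_build_range grids (build_range grids)

-- ===== LEMMAS AND PROOFS =====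

-- min/max as A writes them
theorem pv_if_min (a b : Int) : (if b ≤ a then b else a) = min a b := by
  by_cases h : b ≤ a <;> simp [min_def, h] <;> omega
theorem pv_if_max (a b : Int) : (if b ≥ a then b else a) = max a b := by
  by_cases h : b ≥ a <;> simp [max_def, h] <;> omega

-- A's four-way bounds fold is the componentwise running min/max
theorem pv_fold_bounds (L : List (Int × Int)) : ∀ a b c d : Int,
    L.foldl (fun (m : Int × Int × Int × Int) p =>
      (if p.1 ≤ m.1 then p.1 else m.1, if p.1 ≥ m.2.1 then p.1 else m.2.1,
       if p.2 ≤ m.2.2.1 then p.2 else m.2.2.1, if p.2 ≥ m.2.2.2 then p.2 else m.2.2.2))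
      (a, b, c, d)
    = ((L.map (·.1)).foldl min a, (L.map (·.1)).foldl max b,
       (L.map (·.2)).foldl min c, (L.map (·.2)).foldl max d) := by
  induction L with
  | nil => intro a b c d; rfl
  | cons p t ih =>
      intro a b c d
      rw [List.foldl_cons]
      show List.foldl _ (if p.1 ≤ a then p.1 else a, if p.1 ≥ b then p.1 else b,
        if p.2 ≤ c then p.2 else c, if p.2 ≥ d then p.2 else d) t = _
      rw [pv_if_min, pv_if_max, pv_if_min, pv_if_max, ih]
      simp

theorem pv_foldl_min_le_init (L : List Int) : ∀ a : Int, L.foldl min a ≤ a := by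
  induction L with
  | nil => intro a; simp
  | cons x t ih => intro a; exact le_trans (ih (min a x)) (min_le_left _ _)

theorem pv_init_le_foldl_max (L : List Int) : ∀ a : Int, a ≤ L.foldl max a := by
  induction L with
  | nil => intro a; simp
  | cons x t ih => intro a; exact le_trans (le_max_left _ _) (ih (max a x))

theorem pv_foldl_min_le_mem (L : List Int) : ∀ a x, x ∈ L → L.foldl min a ≤ x := by
  induction L with
  | nil => intro a x h; simp at h
  | cons y t ih =>
      intro a x h
      rcases List.mem_cons.mp h with rfl | h
      · exact le_trans (pv_foldl_min_le_init t (min a x)) (min_le_right _ _)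
      · exact ih _ x h

theorem pv_mem_le_foldl_max (L : List Int) : ∀ a x, x ∈ L → x ≤ L.foldl max a := by
  induction L with
  | nil => intro a x h; simp at h
  | cons y t ih =>
      intro a x h
      rcases List.mem_cons.mp h with rfl | h
      · exact le_trans (le_max_right a x) (pv_init_le_foldl_max t (max a x))
      · exact ih _ x h

-- reading / writing one grid cell
def pvRead (M : List (List String)) (x y : Nat) : String := (M.getD x []).getD y ""

def pvWr (v : String) (M : List (List String)) (q : Int × Int) : List (List String) :=
  PySem.List.pySetD M q.1 (PySem.List.pySetD (PySem.List.pyGetD M q.1 []) q.2 v)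

theorem pv_getD_set {α : Type} [Inhabited α] (l : List α) (n x : Nat) (a d : α)
    (hn : n < l.length) : (l.set n a).getD x d = if x = n then a else l.getD x d := by
  by_cases hx : x = n
  · subst hx; simp [List.getD, hn]
  · simp [List.getD, hx, Ne.symm hx]

theorem pv_wr_length (v : String) (M : List (List String)) (q : Int × Int) :
    (pvWr v M q).length = M.length := by
  simp [pvWr, PySem.List.length_pySetD]

theorem pv_wr_rect (v : String) (M : List (List String)) (q : Int × Int) (W : Nat)
    (hrect : ∀ r ∈ M, r.length = W) (h1 : 0 ≤ q.1) (h1' : q.1 < (M.length : Int)) :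
    ∀ r ∈ pvWr v M q, r.length = W := by
  intro r hr
  unfold pvWr at hr
  rw [PySem.List.pySetD_of_nonneg _ _ h1] at hr
  rcases List.mem_or_eq_of_mem_set hr with h | rfl
  · exact hrect r h
  · rw [PySem.List.length_pySetD]
    exact hrect _ (PySem.List.pyGetD_mem M _ ⟨by omega, by omega⟩)

theorem pv_read_wr (v : String) (M : List (List String)) (q : Int × Int) (W : Nat)
    (hrect : ∀ r ∈ M, r.length = W)
    (h1 : 0 ≤ q.1) (h1' : q.1 < (M.length : Int)) (h2 : 0 ≤ q.2) (h2' : q.2 < (W : Int))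
    (x y : Nat) :
    pvRead (pvWr v M q) x y = if q = ((x : Int), (y : Int)) then v else pvRead M x y := by
  have hq1n : q.1.toNat < M.length := by omega
  have hrow : PySem.List.pyGetD M q.1 ([] : List String) = M[q.1.toNat] :=
    PySem.List.pyGetD_eq_getElem M ([] : List String) h1 h1'
  have hrlen : (M[q.1.toNat]'hq1n).length = W := hrect _ (List.getElem_mem hq1n)
  have hq2n : q.2.toNat < (M[q.1.toNat]'hq1n).length := by omega
  unfold pvWr pvRead
  rw [PySem.List.pySetD_of_nonneg _ _ h1, pv_getD_set _ _ _ _ _ hq1n]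
  by_cases hx : x = q.1.toNat
  · subst hx
    rw [if_pos rfl, hrow, PySem.List.pySetD_of_nonneg _ _ h2,
      pv_getD_set _ _ _ _ _ hq2n]
    by_cases hy : y = q.2.toNat
    · subst hy
      rw [if_pos rfl, if_pos (by rw [Prod.ext_iff]; refine ⟨by simp; omega, by simp; omega⟩)]
    · rw [if_neg hy, if_neg (by intro hc; rw [Prod.ext_iff] at hc; simp at hc; omega)]
      rw [List.getD_eq_getElem _ _ hq1n]
  · rw [if_neg hx, if_neg (by intro hc; rw [Prod.ext_iff] at hc; simp at hc; omega)]

-- scatter fold, cellwise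
theorem pv_scatter (W : Nat) (v : String) : ∀ (ps : List (Int × Int)) (M : List (List String)),
    (∀ r ∈ M, r.length = W) →
    (∀ q ∈ ps, 0 ≤ q.1 ∧ q.1 < (M.length : Int) ∧ 0 ≤ q.2 ∧ q.2 < (W : Int)) →
    (ps.foldl (pvWr v) M).length = M.length ∧
    (∀ r ∈ ps.foldl (pvWr v) M, r.length = W) ∧
    (∀ x y : Nat, pvRead (ps.foldl (pvWr v) M) x y =
      if ((x : Int), (y : Int)) ∈ ps then v else pvRead M x y) := by
  intro ps
  induction ps with
  | nil => intro M hrect hq; refine ⟨rfl, hrect, ?_⟩; intro x y; simp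
  | cons q t ih =>
      intro M hrect hq
      have hq0 := hq q (List.mem_cons_self ..)
      have hrect' := pv_wr_rect v M q W hrect hq0.1 hq0.2.1
      have hlen' : (pvWr v M q).length = M.length := pv_wr_length v M q
      have hq' : ∀ p ∈ t, 0 ≤ p.1 ∧ p.1 < ((pvWr v M q).length : Int) ∧ 0 ≤ p.2 ∧ p.2 < (W : Int) := by
        intro p hp; rw [hlen']; exact hq p (List.mem_cons_of_mem _ hp)
      obtain ⟨l1, l2, l3⟩ := ih (pvWr v M q) hrect' hq'
      refine ⟨by rw [List.foldl_cons, l1, hlen'], by rw [List.foldl_cons]; exact l2, ?_⟩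
      intro x y
      rw [List.foldl_cons, l3 x y,
        pv_read_wr v M q W hrect hq0.1 hq0.2.1 hq0.2.2.1 hq0.2.2.2 x y]
      by_cases hm : ((x : Int), (y : Int)) ∈ t
      · simp [hm]
      · by_cases he : q = ((x : Int), (y : Int)) <;> simp [hm, he, List.mem_cons, Eq.comm]

def pvShift (mr mc : Int) (p : Int × Int) : Int × Int := (-mr + p.1, -mc + p.2)

theorem pv_pyRange_map_const {β : Type} (n : Int) (c : β) :
    (PySem.List.pyRange 0 n 1).map (fun _ => c) = List.replicate n.toNat c := by
  rw [PySem.List.pyRange_one, List.map_map]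
  show List.map (fun _ => c) _ = _
  rw [List.map_const', List.length_range]
  simp

theorem pv_read_rep (H W : Nat) (e : String) (x y : Nat) :
    pvRead (List.replicate H (List.replicate W e)) x y = if x < H ∧ y < W then e else "" := by
  unfold pvRead
  by_cases hx : x < H <;> by_cases hy : y < W <;>
    simp [List.getD, hx, hy]

theorem pv_main (grids : List (List (String × Int))) :
    build_range grids = build_range_alt grids := by
  unfold build_range build_range_alt
  dsimp only
  have hfold : List.foldl (fun (m : Int × Int × Int × Int) item =>
      (if (List.lookup "row" item).getD 0 ≤ m.1 then (List.lookup "row" item).getD 0 else m.1,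
       if (List.lookup "row" item).getD 0 ≥ m.2.1 then (List.lookup "row" item).getD 0 else m.2.1,
       if (List.lookup "col" item).getD 0 ≤ m.2.2.1 then (List.lookup "col" item).getD 0 else m.2.2.1,
       if (List.lookup "col" item).getD 0 ≥ m.2.2.2 then (List.lookup "col" item).getD 0 else m.2.2.2))
      ((0:Int), (0:Int), (0:Int), (0:Int)) ([("row", (0:Int)), ("col", (0:Int))] :: grids)
      = (((grids.map pvRC).map (fun x => x.1)).foldl min 0,
         ((grids.map pvRC).map (fun x => x.1)).foldl max 0,
         ((grids.map pvRC).map (fun x => x.2)).foldl min 0,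
         ((grids.map pvRC).map (fun x => x.2)).foldl max 0) := by
    rw [List.foldl_cons]
    show List.foldl _ ((0:Int), (0:Int), (0:Int), (0:Int)) grids = _
    have h := pv_fold_bounds (grids.map pvRC) 0 0 0 0
    rw [List.foldl_map] at h
    exact h
  rw [hfold]
  rw [PySem.List.min?_id_cons, PySem.List.max?_id_cons, PySem.List.min?_id_cons,
    PySem.List.max?_id_cons, Option.getD_some, Option.getD_some, Option.getD_some,
    Option.getD_some]
  set pts := grids.map pvRC with hpts
  set minr := List.foldl min 0 (pts.map (fun x => x.1)) with hminr
  set maxr := List.foldl max 0 (pts.map (fun x => x.1)) with hmaxr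
  set minc := List.foldl min 0 (pts.map (fun x => x.2)) with hminc
  set maxc := List.foldl max 0 (pts.map (fun x => x.2)) with hmaxc
  dsimp only
  have hminr0 : minr ≤ 0 := pv_foldl_min_le_init _ 0
  have hminc0 : minc ≤ 0 := pv_foldl_min_le_init _ 0
  have hmaxr0 : (0:Int) ≤ maxr := pv_init_le_foldl_max _ 0
  have hmaxc0 : (0:Int) ≤ maxc := pv_init_le_foldl_max _ 0
  rw [abs_of_nonpos hminr0, abs_of_nonpos hminc0,
    show maxr - minr + 1 = -minr + maxr + 1 by ring,
    show maxc - minc + 1 = -minc + maxc + 1 by ring,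
    pv_pyRange_map_const, pv_pyRange_map_const]
  set HN := (-minr + maxr + 1).toNat with hHN
  set WN := (-minc + maxc + 1).toNat with hWN
  set M0 := List.replicate HN (List.replicate WN "　") with hM0
  have hsc : List.foldl (fun M item => PySem.List.pySetD M
        (-minr + (List.lookup "row" item).getD 0)
        (PySem.List.pySetD
          (PySem.List.pyGetD M (-minr + (List.lookup "row" item).getD 0) [])
          (-minc + (List.lookup "col" item).getD 0) "□")) M0 grids
      = List.foldl (pvWr "□") M0 (pts.map (pvShift minr minc)) := by
    rw [List.foldl_map, hpts, List.foldl_map]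
    rfl
  rw [hsc]
  have horig : ∀ M : List (List String), PySem.List.pySetD M (-minr)
      (PySem.List.pySetD (PySem.List.pyGetD M (-minr) []) (-minc) "■")
      = pvWr "■" M (-minr, -minc) := fun M => rfl
  rw [horig]
  have hHNi : (HN : Int) = -minr + maxr + 1 := by
    rw [hHN]; exact Int.toNat_of_nonneg (by omega)
  have hWNi : (WN : Int) = -minc + maxc + 1 := by
    rw [hWN]; exact Int.toNat_of_nonneg (by omega)
  have hM0len : M0.length = HN := by rw [hM0, List.length_replicate]
  have hrect0 : ∀ r ∈ M0, r.length = WN := by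
    intro r hr
    rw [hM0] at hr
    rw [List.eq_of_mem_replicate hr, List.length_replicate]
  have hbpts : ∀ p ∈ pts, minr ≤ p.1 ∧ p.1 ≤ maxr ∧ minc ≤ p.2 ∧ p.2 ≤ maxc := by
    intro p hp
    exact ⟨pv_foldl_min_le_mem _ _ _ (List.mem_map_of_mem hp),
      pv_mem_le_foldl_max _ _ _ (List.mem_map_of_mem hp),
      pv_foldl_min_le_mem _ _ _ (List.mem_map_of_mem hp),
      pv_mem_le_foldl_max _ _ _ (List.mem_map_of_mem hp)⟩
  have hq : ∀ q ∈ pts.map (pvShift minr minc),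
      0 ≤ q.1 ∧ q.1 < (M0.length : Int) ∧ 0 ≤ q.2 ∧ q.2 < (WN : Int) := by
    intro q hqm
    obtain ⟨p, hp, rfl⟩ := List.mem_map.mp hqm
    obtain ⟨h1, h2, h3, h4⟩ := hbpts p hp
    rw [hM0len, hHNi, hWNi]
    simp only [pvShift]
    refine ⟨by omega, by omega, by omega, by omega⟩
  obtain ⟨hlenF, hrectF, hreadF⟩ :=
    pv_scatter WN "□" (pts.map (pvShift minr minc)) M0 hrect0 hq
  have hlenMid : (List.foldl (pvWr "□") M0 (pts.map (pvShift minr minc))).length = HN := by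
    rw [hlenF, hM0len]
  have hreadFin := pv_read_wr "■" (List.foldl (pvWr "□") M0 (pts.map (pvShift minr minc)))
    (-minr, -minc) WN hrectF (by omega) (by rw [hlenMid, hHNi]; omega)
    (by omega) (by rw [hWNi]; omega)
  have hlenFin : (pvWr "■" (List.foldl (pvWr "□") M0 (pts.map (pvShift minr minc)))
      (-minr, -minc)).length = HN := by rw [pv_wr_length, hlenMid]
  have hrectFin := pv_wr_rect "■" (List.foldl (pvWr "□") M0 (pts.map (pvShift minr minc)))
    (-minr, -minc) WN hrectF (by omega) (by rw [hlenMid, hHNi]; omega)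
  have hcells : List.map (fun p => (p.1 - minr, p.2 - minc)) pts
      = List.map (pvShift minr minc) pts := by
    refine List.map_congr_left ?_
    intro p hp
    refine Prod.ext ?_ ?_ <;> dsimp [pvShift] <;> ring
  apply congrArg
  have hlist : pvWr "■" (List.foldl (pvWr "□") M0 (pts.map (pvShift minr minc))) (-minr, -minc)
      = List.map (fun h => List.map (fun w =>
          if (h, w) = (-minr, -minc) then "■"
          else if (PySem.Set.ofList (List.map (fun p => (p.1 - minr, p.2 - minc)) pts)).contains (h, w) = true then "□"
          else "　") (PySem.List.pyRange 0 (-minc + maxc + 1)))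
        (PySem.List.pyRange 0 (-minr + maxr + 1)) := by
    apply List.ext_getElem
    · rw [hlenFin, List.length_map, PySem.List.length_pyRange_one, hHN, sub_zero]
    · intro i hi1 hi2
      rw [List.getElem_map, PySem.List.getElem_pyRange_one]
      have hiHN : i < HN := by rw [← hlenFin]; exact hi1
      apply List.ext_getElem
      · rw [hrectFin _ (List.getElem_mem hi1), List.length_map,
          PySem.List.length_pyRange_one, hWN, sub_zero]
      · intro j hj1 hj2
        have hjWN : j < WN := by rw [← hrectFin _ (List.getElem_mem hi1)]; exact hj1
        rw [List.getElem_map, PySem.List.getElem_pyRange_one]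
        have hL : (pvWr "■" (List.foldl (pvWr "□") M0 (pts.map (pvShift minr minc)))
            (-minr, -minc))[i][j]'hj1
            = pvRead (pvWr "■" (List.foldl (pvWr "□") M0 (pts.map (pvShift minr minc)))
              (-minr, -minc)) i j := by
          unfold pvRead
          rw [List.getD_eq_getElem _ _ hi1, List.getD_eq_getElem _ _ hj1]
        rw [hL, hreadFin i j, hreadF i j, hM0]
        rw [pv_read_rep HN WN "　" i j, if_pos (And.intro hiHN hjWN)]
        simp only [zero_add]
        by_cases h1 : ((i:Int), (j:Int)) = (-minr, -minc)
        · simp [h1]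
        · by_cases h2 : ((i:Int), (j:Int)) ∈ List.map (pvShift minr minc) pts
          · obtain ⟨p, hp, he⟩ := List.mem_map.mp h2
            have he1 : -minr + p.1 = (i:Int) := by
              have h := congrArg Prod.fst he; simpa [pvShift] using h
            have he2 : -minc + p.2 = (j:Int) := by
              have h := congrArg Prod.snd he; simpa [pvShift] using h
            simp [h1, Ne.symm h1, h2]
            exact ⟨p.1, p.2, by simpa using hp, by omega, by omega⟩
          · simp [h1, Ne.symm h1, h2]
            intro a b hab e1 e2
            exact h2 (List.mem_map.mpr ⟨(a, b), hab,
              by refine Prod.ext ?_ ?_ <;> dsimp [pvShift] <;> omega⟩)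
  rw [hlist, List.map_map]
  rfl

-- ===== VERDICT (by name: the statement is the Claim_ definition above) =====
theorem build_range_spec : Claim_equal_build_range := by
  intro grids _ _
  unfold Spec_build_range
  exact pv_main grids
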